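-- pv_equiv track=rewrite | github.com/ParisSaeedi/bionlp_st_2013_supporting | tls/ptbesc.py | __escape_quotes
-- ===== SOURCE A (Python) =====
-- def __escape_quotes(s, in_quotes=False):
--     curr_pos = 0
--     r = []
--     while curr_pos < len(s):
--         next_quote = s.find('"', curr_pos)
--         if next_quote == -1:
--             r.append(s[curr_pos:])
--             break
--         r.append(s[curr_pos:next_quote])
--         if in_quotes:
--             r.append("''")
--         else:
--             r.append('``')
--         in_quotes = not in_quotes
--         curr_pos = next_quote + 1
--     return (''.join(r), in_quotes, )
-- ===== SOURCE B (Python) =====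
-- def __escape_quotes(s, in_quotes=False):
--     parts = s.split('"')
--     d = ("''", '``') if in_quotes else ('``', "''")
--     r = parts[0]
--     for p in parts[1:]:
--         r += d[0] + p
--         d = (d[1], d[0])
--     return (r, in_quotes ^ (len(parts) % 2 == 0))
-- ===== Notes on version B (the rewrite author's own statement) =====
-- stated objective: simpler
-- what changed: Replaces A's positional find/slice while-loop (tracking curr_pos and toggling in_quotes at each hit) with a split-then-rebuild decomposition: split the string on the double-quote character, fold over the later parts interleaving the alternating delimiter pair, and compute the returned state once from the parity of the number of parts.
import Mathlib
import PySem

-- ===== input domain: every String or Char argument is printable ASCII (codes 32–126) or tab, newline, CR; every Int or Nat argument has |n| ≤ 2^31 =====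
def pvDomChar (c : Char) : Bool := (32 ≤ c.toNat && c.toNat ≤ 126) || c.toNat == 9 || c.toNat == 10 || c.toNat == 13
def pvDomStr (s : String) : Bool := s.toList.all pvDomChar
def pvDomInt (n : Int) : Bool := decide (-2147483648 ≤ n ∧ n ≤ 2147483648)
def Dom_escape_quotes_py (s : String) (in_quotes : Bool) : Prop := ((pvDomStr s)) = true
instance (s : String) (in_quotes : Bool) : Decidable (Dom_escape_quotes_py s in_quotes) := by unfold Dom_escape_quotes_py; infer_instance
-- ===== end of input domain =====

-- B replaces A's positional find/slice scan by split-then-rebuild with the final state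
-- computed from the parity of the number of parts (objective: simpler decomposition).

-- ===== PORT A =====
-- A's while loop over curr_pos: each iteration works on the suffix s[curr_pos:], finds the
-- next '"', appends the segment and the alternating delimiter to the piece list r, and
-- continues after the quote; ported as recursion on the remaining suffix.
def escapeLoop (cs : List Char) (q : Bool) : List (List Char) × Bool :=
  if h : cs = [] then ([], q)                         -- while curr_pos < len(s) fails
  else
    let nq := PySem.Chars.find cs ['"']               -- s.find('"', curr_pos)
    if nq = -1 then ([cs], q)                         -- r.append(s[curr_pos:]); break
    else
      let t := escapeLoop (cs.drop (nq.toNat + 1)) (!q)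
      (cs.take nq.toNat :: (if q then "''".toList else "``".toList) :: t.1, t.2)
termination_by cs.length
decreasing_by
  have : 0 < cs.length := List.length_pos_of_ne_nil h
  simp [List.length_drop]; omega

def escape_quotes_py (s : String) (in_quotes : Bool) : String × Bool :=
  let r := escapeLoop s.toList in_quotes
  (String.mk (PySem.Chars.join [] r.1), r.2)          -- ''.join(r)

-- ===== PORT B =====
-- Source B: parts = s.split('"'); fold over parts[1:] prepending the current delimiter and
-- swapping the delimiter pair; final state from the parity of len(parts).
def escapeAltFold (r : List Char) (d : List Char × List Char) : List (List Char) → List Char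
  | [] => r
  | p :: ps => escapeAltFold (r ++ d.1 ++ p) (d.2, d.1) ps

def escape_quotes_py_alt (s : String) (in_quotes : Bool) : String × Bool :=
  let parts := s.toList.splitOn '"'                   -- s.split('"'), single-char separator
  let d : List Char × List Char :=
    if in_quotes then ("''".toList, "``".toList) else ("``".toList, "''".toList)
  let r := escapeAltFold (parts.headD []) d (parts.drop 1)
  (String.mk r, in_quotes ^^ (parts.length % 2 == 0))

-- ===== PRECONDITION & SPEC =====
def Spec_escape_quotes_py (s : String) (in_quotes : Bool) (out : String × Bool) : Prop := out = escape_quotes_py_alt s in_quotes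
instance (s : String) (in_quotes : Bool) (out : String × Bool) : Decidable (Spec_escape_quotes_py s in_quotes out) := by unfold Spec_escape_quotes_py; infer_instance

-- ===== CLAIM (what is proved, stated in full; the proofs are below) =====
def Claim_equal_escape_quotes_py : Prop := ∀ (s : String) (in_quotes : Bool), Dom_escape_quotes_py s in_quotes → Spec_escape_quotes_py s in_quotes (escape_quotes_py s in_quotes)

-- ===== LEMMAS AND PROOFS =====

theorem join_nil_flatten (ps : List (List Char)) : PySem.Chars.join [] ps = ps.flatten := by
  induction ps with
  | nil => rfl
  | cons p ps ih =>
    cases ps with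
    | nil => simp [PySem.Chars.join, List.intercalate, List.intersperse]
    | cons q qs =>
      simp only [PySem.Chars.join, List.intercalate, List.intersperse, List.flatten] at ih ⊢
      simp [ih]

theorem splitOn_no_quote {cs : List Char} (h : '"' ∉ cs) : cs.splitOn '"' = [cs] := by
  induction cs with
  | nil => rfl
  | cons a cs ih =>
    have ha : (a == '"') = false := by
      simp only [beq_eq_false_iff_ne]; intro e; exact h (e ▸ List.mem_cons_self)
    show List.splitOnP (· == '"') (a :: cs) = [a :: cs]
    rw [List.splitOnP_cons, ha]
    simp only [Bool.false_eq_true, if_false]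
    have := ih (fun hm => h (List.mem_cons_of_mem _ hm))
    rw [show List.splitOnP (· == '"') cs = [cs] from this]
    rfl

theorem splitOn_split {pre : List Char} (rest : List Char) (h : '"' ∉ pre) :
    (pre ++ '"' :: rest).splitOn '"' = pre :: rest.splitOn '"' := by
  induction pre with
  | nil =>
    show List.splitOnP (· == '"') ('"' :: rest) = [] :: _
    rw [List.splitOnP_cons]; simp [List.splitOn]
  | cons a pre ih =>
    have ha : (a == '"') = false := by
      simp only [beq_eq_false_iff_ne]; intro e; exact h (e ▸ List.mem_cons_self)
    show List.splitOnP (· == '"') (a :: (pre ++ '"' :: rest)) = (a :: pre) :: _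
    rw [List.splitOnP_cons, ha]
    simp only [Bool.false_eq_true, if_false]
    have := ih (fun hm => h (List.mem_cons_of_mem _ hm))
    rw [show List.splitOnP (· == '"') (pre ++ '"' :: rest) = pre :: rest.splitOn '"' from this]
    rfl

theorem altFold_append (ps : List (List Char)) : ∀ (r : List Char) (d : List Char × List Char),
    escapeAltFold r d ps = r ++ escapeAltFold [] d ps := by
  induction ps with
  | nil => intro r d; simp [escapeAltFold]
  | cons p ps ih =>
    intro r d
    simp only [escapeAltFold, List.nil_append]
    rw [ih (r ++ d.1 ++ p) (d.2, d.1), ih (d.1 ++ p) (d.2, d.1)]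
    simp [List.append_assoc]

theorem parity_flip (q : Bool) (n : Nat) :
    ((!q) ^^ (n % 2 == 0)) = (q ^^ ((n + 1) % 2 == 0)) := by
  rcases Nat.mod_two_eq_zero_or_one n with h | h <;> cases q <;>
    simp [h, Nat.add_mod]

theorem escapeLoop_eq_alt (cs : List Char) (q : Bool) :
    (PySem.Chars.join [] (escapeLoop cs q).1, (escapeLoop cs q).2) =
      (escapeAltFold ((cs.splitOn '"').headD [])
        (if q then ("''".toList, "``".toList) else ("``".toList, "''".toList))
        ((cs.splitOn '"').drop 1),
       q ^^ ((cs.splitOn '"').length % 2 == 0)) := by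
  induction hn : cs.length using Nat.strong_induction_on generalizing cs q with
  | _ n ih =>
  by_cases hnil : cs = []
  · subst hnil
    simp [escapeLoop, PySem.Chars.join, List.intercalate, escapeAltFold]
  · have hfind := PySem.Chars.neg_one_le_find cs ['"']
    by_cases hneg : PySem.Chars.find cs ['"'] = -1
    · -- no quote: one segment, state unchanged
      have hmem : '"' ∉ cs := by
        intro hm
        exact ((PySem.Chars.find_eq_neg_one_iff cs ['"']).mp hneg)
          ((List.singleton_infix_iff _ _).mpr hm)
      rw [escapeLoop]
      simp only [hnil, dite_false, hneg, if_true, splitOn_no_quote hmem]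
      simp [escapeAltFold]
    · -- quote at index i
      set f := PySem.Chars.find cs ['"'] with hf
      have hpos : 0 ≤ f := by omega
      obtain ⟨hpre, hmin⟩ := PySem.Chars.find_spec (s := cs) (sub := ['"']) hpos
      obtain ⟨t, ht⟩ := hpre
      have hdropi : cs.drop f.toNat = '"' :: t := by simpa using ht.symm
      have htt : t = cs.drop (f.toNat + 1) := by
        have h1 : cs.drop (f.toNat + 1) = (cs.drop f.toNat).drop 1 := by
          rw [List.drop_drop]
        rw [h1, hdropi]; rfl
      have hdecomp : cs = cs.take f.toNat ++ '"' :: cs.drop (f.toNat + 1) := by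
        conv_lhs => rw [← List.take_append_drop f.toNat cs]
        rw [hdropi, htt]
      have hnotake : '"' ∉ cs.take f.toNat := by
        intro hm
        obtain ⟨j, hj, hget⟩ := List.getElem_of_mem hm
        have hjlen : j < cs.length := lt_of_lt_of_le hj (by simp [List.length_take])
        have hji : j < f.toNat := lt_of_lt_of_le hj (by simp [List.length_take])
        have hgj : cs[j] = '"' := by
          rw [← hget]; simp [List.getElem_take]
        exact hmin j hji ⟨cs.drop (j + 1), by
          rw [List.drop_eq_getElem_cons hjlen, hgj]; rfl⟩
      have hsplit : cs.splitOn '"' = cs.take f.toNat :: (cs.drop (f.toNat + 1)).splitOn '"' := by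
        conv_lhs => rw [hdecomp]
        exact splitOn_split _ hnotake
      -- unfold A one step
      rw [escapeLoop]
      simp only [hnil, dite_false, ← hf, hneg, if_false]
      -- IH on the suffix
      have hlt : (cs.drop (f.toNat + 1)).length < n := by
        have h0 : 0 < cs.length := List.length_pos_of_ne_nil hnil
        simp [List.length_drop]; omega
      have hIH := ih _ (hn ▸ hlt) (cs.drop (f.toNat + 1)) (!q) rfl
      obtain ⟨p', ps', hps'⟩ :=
        List.exists_cons_of_ne_nil (List.splitOnP_ne_nil (· == '"') (cs.drop (f.toNat + 1)))
      have hps : (cs.drop (f.toNat + 1)).splitOn '"' = p' :: ps' := hps'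
      rw [hps] at hIH
      rw [hsplit, hps]
      have h1 := congrArg Prod.fst hIH
      have h2 := congrArg Prod.snd hIH
      simp only [List.headD_cons, List.drop_one, List.tail_cons] at h1 h2
      refine Prod.ext ?_ ?_
      · -- string components
        dsimp only
        simp only [join_nil_flatten, List.flatten_cons, List.headD_cons, List.drop_one,
          List.tail_cons, escapeAltFold]
        rw [join_nil_flatten] at h1
        rw [altFold_append ps'] at h1 ⊢
        cases q <;>
          simp only [Bool.not_false, Bool.not_true, if_true] at h1 ⊢ <;>
          rw [h1] <;> simp [List.append_assoc]
      · -- state components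
        dsimp only
        rw [h2]
        simp only [List.length_cons]
        exact parity_flip q (ps'.length + 1)

-- ===== VERDICT (by name: the statement is the Claim_ definition above) =====
theorem escape_quotes_py_spec : Claim_equal_escape_quotes_py := by
  intro s q _
  unfold Spec_escape_quotes_py escape_quotes_py escape_quotes_py_alt
  have h := escapeLoop_eq_alt s.toList q
  have h1 := congrArg Prod.fst h
  have h2 := congrArg Prod.snd h
  simp only at h1 h2
  simp only [h1, h2]
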